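-- pv_equiv track=rewrite | github.com/nathanrobertbaldwin/leetcode | Fun Practice/1-8-2024-queen-attack-ii.py | _update_queen_bounds
-- ===== SOURCE A (Python) =====
-- def _convert(size, pre_row, pre_col):
--     row = size - pre_row
--     col = pre_col - 1
--     return (row, col)
--
-- def _update_queen_bounds(size, queen_bounds, obstacles):
--     (queen_row, queen_col) = queen_bounds["q"]
--
--     for obstacle in obstacles:
--         pre_row = obstacle[0]
--         pre_col = obstacle[1]
--         (obstacle_row, obstacle_col) = _convert(size, pre_row, pre_col)
--
--         if obstacle_row == queen_row:
--             if obstacle_col > queen_bounds["l"][1] and obstacle_col < queen_col: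
--                 queen_bounds["l"] = (obstacle_row, obstacle_col + 1)
--             elif obstacle_col < queen_bounds["r"][1] and obstacle_col > queen_col:
--                 queen_bounds["r"] = (obstacle_row, obstacle_col - 1)
--
--         if obstacle_col == queen_col:
--             if obstacle_row > queen_bounds["t"][0] and obstacle_row < queen_row:
--                 queen_bounds["t"] = (obstacle_row + 1, obstacle_col)
--             elif obstacle_row < queen_bounds["b"][0] and obstacle_row > queen_row:
--                 queen_bounds["b"] = (obstacle_row - 1, obstacle_col)
--
--         if obstacle_row - queen_row == obstacle_col - queen_col:
--             if obstacle_row > queen_bounds["tl"][0] and obstacle_row < queen_row: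
--                 queen_bounds["tl"] = (obstacle_row + 1, obstacle_col + 1)
--             elif obstacle_row < queen_bounds["br"][0] and obstacle_row > queen_row:
--                 queen_bounds["br"] = (obstacle_row - 1, obstacle_col - 1)
--
--         if obstacle_row - queen_row == -(obstacle_col - queen_col):
--             if obstacle_row > queen_bounds["tr"][0] and obstacle_row < queen_row:
--                 queen_bounds["tr"] = (obstacle_row + 1, obstacle_col - 1)
--             elif obstacle_row < queen_bounds["bl"][0] and obstacle_row > queen_row:
--                 queen_bounds["bl"] = (obstacle_row - 1, obstacle_col + 1)
--
--     return queen_bounds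
-- ===== SOURCE B (Python) =====
-- # B: per-direction collect/scan decomposition -- eight independent 1-D scans over the
-- # converted obstacle points, one per directional key, written back into the dict
-- # (mutates queen_bounds in place, like A; equivalence claimed for the return value).
-- def _convert(size, pre_row, pre_col):
--     row = size - pre_row
--     col = pre_col - 1
--     return (row, col)
--
-- def _update_queen_bounds(size, queen_bounds, obstacles):
--     (qr, qc) = queen_bounds["q"]
--     pts = [_convert(size, ob[0], ob[1]) for ob in obstacles]
--     dirs = [
--         ("l", 1, 1, lambda r, c: c if r == qr else None, lambda ns: (qr, ns)),
--         ("r", -1, 1, lambda r, c: c if r == qr else None, lambda ns: (qr, ns)),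
--         ("t", 1, 0, lambda r, c: r if c == qc else None, lambda ns: (ns, qc)),
--         ("b", -1, 0, lambda r, c: r if c == qc else None, lambda ns: (ns, qc)),
--         ("tl", 1, 0, lambda r, c: r if r - qr == c - qc else None, lambda ns: (ns, qc + (ns - qr))),
--         ("br", -1, 0, lambda r, c: r if r - qr == c - qc else None, lambda ns: (ns, qc + (ns - qr))),
--         ("tr", 1, 0, lambda r, c: r if r - qr == qc - c else None, lambda ns: (ns, qc - (ns - qr))),
--         ("bl", -1, 0, lambda r, c: r if r - qr == qc - c else None, lambda ns: (ns, qc - (ns - qr))),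
--     ]
--     for key, d, axis, proj, rebuild in dirs:
--         if key not in queen_bounds:
--             continue
--         qs = (qr, qc)[axis]
--         cur = queen_bounds[key][axis]
--         best = None
--         for (r, c) in pts:
--             s = proj(r, c)
--             if s is not None and d * s > d * cur and d * s < d * qs:
--                 cur = s + d
--                 best = cur
--         if best is not None:
--             queen_bounds[key] = rebuild(best)
--     return queen_bounds
-- ===== Notes on version B (the rewrite author's own statement) =====
-- stated objective: alternative
-- what changed: A's single fused pass that threads one mutating dict through four nested if/elif groups is replaced by eight independent per-direction 1-D scans: the obstacles are converted once, each directional bound present in the dict is computed by its own scalar fold over the converted points, and only the changed bounds are written back.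
import Mathlib
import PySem

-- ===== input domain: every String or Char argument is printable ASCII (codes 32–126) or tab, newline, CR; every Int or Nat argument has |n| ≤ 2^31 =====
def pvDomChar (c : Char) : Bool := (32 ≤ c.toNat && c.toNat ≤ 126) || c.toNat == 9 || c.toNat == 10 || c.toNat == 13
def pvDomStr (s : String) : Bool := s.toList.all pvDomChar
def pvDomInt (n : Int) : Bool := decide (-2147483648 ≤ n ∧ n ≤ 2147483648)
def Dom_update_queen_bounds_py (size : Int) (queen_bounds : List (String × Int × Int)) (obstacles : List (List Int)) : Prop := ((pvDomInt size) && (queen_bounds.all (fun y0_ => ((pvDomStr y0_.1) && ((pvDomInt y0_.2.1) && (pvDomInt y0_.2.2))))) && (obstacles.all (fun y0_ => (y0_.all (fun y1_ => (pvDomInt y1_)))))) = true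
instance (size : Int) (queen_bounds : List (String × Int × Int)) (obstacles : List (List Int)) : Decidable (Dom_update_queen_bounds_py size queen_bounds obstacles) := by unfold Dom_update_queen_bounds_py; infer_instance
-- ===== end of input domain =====

-- B re-decomposes A's fused single pass into eight independent per-direction 1-D scans
-- over the converted obstacle points (objective: alternative decomposition, same cost).
-- Both programs mutate the queen_bounds dict in place in Python; equivalence here is
-- about the returned dict (which is that same object).

-- ===== PORT A =====
def convert_py (size pre_row pre_col : Int) : Int × Int :=
  (size - pre_row, pre_col - 1)

-- the `if obstacle_row == queen_row:` block of A
def pvRowGroup (qr qc orow ocol : Int) (qb : PySem.Dict String (Int × Int)) : PySem.Dict String (Int × Int) :=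
  if orow = qr then
    (if ocol > (qb.getD "l" (0, 0)).2 ∧ ocol < qc then qb.insert "l" (orow, ocol + 1)
     else if ocol < (qb.getD "r" (0, 0)).2 ∧ ocol > qc then qb.insert "r" (orow, ocol - 1)
     else qb)
  else qb

-- the `if obstacle_col == queen_col:` block of A
def pvColGroup (qr qc orow ocol : Int) (qb : PySem.Dict String (Int × Int)) : PySem.Dict String (Int × Int) :=
  if ocol = qc then
    (if orow > (qb.getD "t" (0, 0)).1 ∧ orow < qr then qb.insert "t" (orow + 1, ocol)
     else if orow < (qb.getD "b" (0, 0)).1 ∧ orow > qr then qb.insert "b" (orow - 1, ocol)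
     else qb)
  else qb

-- the `if obstacle_row - queen_row == obstacle_col - queen_col:` block of A
def pvDiagGroup (qr qc orow ocol : Int) (qb : PySem.Dict String (Int × Int)) : PySem.Dict String (Int × Int) :=
  if orow - qr = ocol - qc then
    (if orow > (qb.getD "tl" (0, 0)).1 ∧ orow < qr then qb.insert "tl" (orow + 1, ocol + 1)
     else if orow < (qb.getD "br" (0, 0)).1 ∧ orow > qr then qb.insert "br" (orow - 1, ocol - 1)
     else qb)
  else qb

-- the `if obstacle_row - queen_row == -(obstacle_col - queen_col):` block of A
def pvAntiGroup (qr qc orow ocol : Int) (qb : PySem.Dict String (Int × Int)) : PySem.Dict String (Int × Int) :=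
  if orow - qr = -(ocol - qc) then
    (if orow > (qb.getD "tr" (0, 0)).1 ∧ orow < qr then qb.insert "tr" (orow + 1, ocol - 1)
     else if orow < (qb.getD "bl" (0, 0)).1 ∧ orow > qr then qb.insert "bl" (orow - 1, ocol + 1)
     else qb)
  else qb

-- one iteration of A's `for obstacle in obstacles:` loop (skips are unreachable under Pre_)
def pvStepA (size qr qc : Int) (qb : PySem.Dict String (Int × Int)) (obstacle : List Int) : PySem.Dict String (Int × Int) :=
  match PySem.List.pyGet? obstacle 0, PySem.List.pyGet? obstacle 1 with
  | some pre_row, some pre_col =>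
      let p := convert_py size pre_row pre_col
      pvAntiGroup qr qc p.1 p.2 (pvDiagGroup qr qc p.1 p.2 (pvColGroup qr qc p.1 p.2 (pvRowGroup qr qc p.1 p.2 qb)))
  | _, _ => qb

def update_queen_bounds_py (size : Int) (queen_bounds : List (String × Int × Int)) (obstacles : List (List Int)) : List (String × Int × Int) :=
  let d : PySem.Dict String (Int × Int) := PySem.Dict.mk queen_bounds
  let q := (d.get? "q").getD (0, 0)
  (obstacles.foldl (pvStepA size q.1 q.2) d).items

-- ===== PORT B =====
-- inner `for (r, c) in pts:` loop body of B's per-direction scan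
def pvScanStep (dsign qs : Int) (proj : Int → Int → Option Int) (st : Int × Option Int) (pt : Int × Int) : Int × Option Int :=
  match proj pt.1 pt.2 with
  | some s => if dsign * s > dsign * st.1 ∧ dsign * s < dsign * qs then (s + dsign, some (s + dsign)) else st
  | none => st

-- one iteration of B's `for key, d, axis, proj, rebuild in dirs:` loop
def pvDoDir (qr qc : Int) (pts : List (Int × Int)) (qb : PySem.Dict String (Int × Int))
    (dir : String × Int × Bool × (Int → Int → Option Int) × (Int → Int × Int)) : PySem.Dict String (Int × Int) :=
  if qb.contains dir.1 then
    let qs := if dir.2.2.1 then qc else qr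
    let v0 := qb.getD dir.1 (0, 0)
    let cur := if dir.2.2.1 then v0.2 else v0.1
    match (pts.foldl (pvScanStep dir.2.1 qs dir.2.2.2.1) (cur, none)).2 with
    | some best => qb.insert dir.1 (dir.2.2.2.2 best)
    | none => qb
  else qb

def update_queen_bounds_py_alt (size : Int) (queen_bounds : List (String × Int × Int)) (obstacles : List (List Int)) : List (String × Int × Int) :=
  let d : PySem.Dict String (Int × Int) := PySem.Dict.mk queen_bounds
  let q := (d.get? "q").getD (0, 0)
  let qr := q.1
  let qc := q.2
  let pts := obstacles.map (fun ob => convert_py size ((PySem.List.pyGet? ob 0).getD 0) ((PySem.List.pyGet? ob 1).getD 0))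
  let dirs : List (String × Int × Bool × (Int → Int → Option Int) × (Int → Int × Int)) :=
    [("l", 1, true, fun r c => if r = qr then some c else none, fun ns => (qr, ns)),
     ("r", -1, true, fun r c => if r = qr then some c else none, fun ns => (qr, ns)),
     ("t", 1, false, fun r c => if c = qc then some r else none, fun ns => (ns, qc)),
     ("b", -1, false, fun r c => if c = qc then some r else none, fun ns => (ns, qc)),
     ("tl", 1, false, fun r c => if r - qr = c - qc then some r else none, fun ns => (ns, qc + (ns - qr))),
     ("br", -1, false, fun r c => if r - qr = c - qc then some r else none, fun ns => (ns, qc + (ns - qr))),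
     ("tr", 1, false, fun r c => if r - qr = qc - c then some r else none, fun ns => (ns, qc - (ns - qr))),
     ("bl", -1, false, fun r c => if r - qr = qc - c then some r else none, fun ns => (ns, qc - (ns - qr)))]
  (dirs.foldl (pvDoDir qr qc pts) d).items

-- ===== PRECONDITION & SPEC =====
-- Pre_ is the natural domain on which A returns normally: the dict holds the queen "q" (with
-- distinct keys, as any Python dict has), every obstacle has both coordinates (A raises
-- IndexError otherwise), and whenever some obstacle lies on one of the four ray pairs through
-- the queen, the two bound keys of that pair are present (A raises KeyError reading a missing
-- bound key of an occupied ray; A reads the second key of a pair lazily, so it can return on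
-- some dicts missing it — those inputs are excluded, see cites).
def Pre_update_queen_bounds_py (size : Int) (queen_bounds : List (String × Int × Int)) (obstacles : List (List Int)) : Prop :=
  (queen_bounds.map Prod.fst).Nodup ∧
  "q" ∈ queen_bounds.map Prod.fst ∧
  (∀ ob ∈ obstacles, 2 ≤ ob.length) ∧
  (let q := ((PySem.Dict.mk queen_bounds).get? "q").getD (0, 0)
   ((∃ ob ∈ obstacles, size - (PySem.List.pyGet? ob 0).getD 0 = q.1) →
      ("l" ∈ queen_bounds.map Prod.fst ∧ "r" ∈ queen_bounds.map Prod.fst)) ∧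
   ((∃ ob ∈ obstacles, (PySem.List.pyGet? ob 1).getD 0 - 1 = q.2) →
      ("t" ∈ queen_bounds.map Prod.fst ∧ "b" ∈ queen_bounds.map Prod.fst)) ∧
   ((∃ ob ∈ obstacles, (size - (PySem.List.pyGet? ob 0).getD 0) - q.1 = ((PySem.List.pyGet? ob 1).getD 0 - 1) - q.2) →
      ("tl" ∈ queen_bounds.map Prod.fst ∧ "br" ∈ queen_bounds.map Prod.fst)) ∧
   ((∃ ob ∈ obstacles, (size - (PySem.List.pyGet? ob 0).getD 0) - q.1 = q.2 - ((PySem.List.pyGet? ob 1).getD 0 - 1)) →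
      ("tr" ∈ queen_bounds.map Prod.fst ∧ "bl" ∈ queen_bounds.map Prod.fst)))
instance (size : Int) (queen_bounds : List (String × Int × Int)) (obstacles : List (List Int)) : Decidable (Pre_update_queen_bounds_py size queen_bounds obstacles) := by unfold Pre_update_queen_bounds_py; infer_instance

def pvWitness_update_queen_bounds_py : Int × (List (String × Int × Int)) × List (List Int) :=
  (3, [("q", (1, 1)), ("l", (1, 0)), ("r", (1, 2)), ("t", (0, 1)), ("b", (2, 1)),
       ("tl", (0, 0)), ("br", (2, 2)), ("tr", (0, 2)), ("bl", (2, 0))], [[1, 1], [2, 3]])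

def Spec_update_queen_bounds_py (size : Int) (queen_bounds : List (String × Int × Int)) (obstacles : List (List Int)) (out : List (String × Int × Int)) : Prop := out = update_queen_bounds_py_alt size queen_bounds obstacles
instance (size : Int) (queen_bounds : List (String × Int × Int)) (obstacles : List (List Int)) (out : List (String × Int × Int)) : Decidable (Spec_update_queen_bounds_py size queen_bounds obstacles out) := by unfold Spec_update_queen_bounds_py; infer_instance

-- ===== CLAIM (what is proved, stated in full; the proofs are below) =====
def Claim_equal_update_queen_bounds_py : Prop := ∀ (size : Int) (queen_bounds : List (String × Int × Int)) (obstacles : List (List Int)), Dom_update_queen_bounds_py size queen_bounds obstacles → Pre_update_queen_bounds_py size queen_bounds obstacles → Spec_update_queen_bounds_py size queen_bounds obstacles (update_queen_bounds_py size queen_bounds obstacles)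

-- ===== LEMMAS AND PROOFS =====



abbrev PVDict := PySem.Dict String (Int × Int)


lemma pv_insert_getD_self (qb : PVDict) {k : String} (hk : k ∈ qb.keys) (hnd : qb.keys.Nodup) (z : Int × Int) :
    qb.insert k (qb.getD k z) = qb := by
  apply PySem.Dict.ext
  rw [PySem.Dict.items_insert_of_contains _ _ ((PySem.Dict.contains_iff_mem_keys qb k).2 hk)]
  conv_rhs => rw [← List.map_id qb.items]
  refine List.map_congr_left ?_
  rintro ⟨pk, pv⟩ hmem
  by_cases hpk : pk = k
  · subst hpk
    simp [PySem.Dict.getD_of_mem_items qb hmem hnd z]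
  · simp [hpk]

def pvGStep (qs dsign : Int) (onRay : Int × Int → Bool) (sel' sel : Int × Int → Int)
    (upd : Int × Int → Int × Int) (v pt : Int × Int) : Int × Int :=
  if onRay pt = true ∧ dsign * sel' pt > dsign * sel v ∧ dsign * sel' pt < dsign * qs then upd pt else v

lemma pvScan_some (qs dsign : Int) (onRay : Int × Int → Bool) (sel' sel : Int × Int → Int)
    (upd : Int × Int → Int × Int) (rebuild : Int → Int × Int) (proj : Int → Int → Option Int)
    (Hproj : ∀ r c : Int, proj r c = if onRay (r, c) = true then some (sel' (r, c)) else none)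
    (Hsel_upd : ∀ pt, onRay pt = true → sel (upd pt) = sel' pt + dsign)
    (Hupd : ∀ pt, onRay pt = true → upd pt = rebuild (sel' pt + dsign))
    (Hselreb : ∀ x, sel (rebuild x) = x) :
    ∀ (pts : List (Int × Int)) (v : Int × Int), v = rebuild (sel v) →
      pts.foldl (pvScanStep dsign qs proj) (sel v, some (sel v)) =
        (sel (pts.foldl (pvGStep qs dsign onRay sel' sel upd) v),
         some (sel (pts.foldl (pvGStep qs dsign onRay sel' sel upd) v)))
      ∧ pts.foldl (pvGStep qs dsign onRay sel' sel upd) v =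
          rebuild (sel (pts.foldl (pvGStep qs dsign onRay sel' sel upd) v)) := by
  intro pts
  induction pts with
  | nil => intro v hv; exact ⟨rfl, hv⟩
  | cons pt rest ih =>
    intro v hv
    simp only [List.foldl_cons]
    have hstep : pvScanStep dsign qs proj (sel v, some (sel v)) pt =
        (sel (pvGStep qs dsign onRay sel' sel upd v pt), some (sel (pvGStep qs dsign onRay sel' sel upd v pt)))
        ∧ pvGStep qs dsign onRay sel' sel upd v pt =
          rebuild (sel (pvGStep qs dsign onRay sel' sel upd v pt)) := by
      by_cases hray : onRay pt = true
      · by_cases hcond : dsign * sel' pt > dsign * sel v ∧ dsign * sel' pt < dsign * qs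
        · have h1 := Hsel_upd pt hray
          have h2 := Hupd pt hray
          constructor <;>
            simp [pvScanStep, pvGStep, Hproj, hray, hcond.1, hcond.2, h1, h2, Hselreb]
        · constructor <;>
            · simp [pvScanStep, pvGStep, Hproj, hray, hcond]
              try exact hv
      · constructor <;>
          · simp [pvScanStep, pvGStep, Hproj, hray]
            try exact hv
    rw [hstep.1]
    exact ih _ hstep.2

lemma pvScan_main (qs dsign : Int) (onRay : Int × Int → Bool) (sel' sel : Int × Int → Int)
    (upd : Int × Int → Int × Int) (rebuild : Int → Int × Int) (proj : Int → Int → Option Int)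
    (Hproj : ∀ r c : Int, proj r c = if onRay (r, c) = true then some (sel' (r, c)) else none)
    (Hsel_upd : ∀ pt, onRay pt = true → sel (upd pt) = sel' pt + dsign)
    (Hupd : ∀ pt, onRay pt = true → upd pt = rebuild (sel' pt + dsign))
    (Hselreb : ∀ x, sel (rebuild x) = x) :
    ∀ (pts : List (Int × Int)) (v : Int × Int),
      (match (pts.foldl (pvScanStep dsign qs proj) (sel v, none)).2 with
       | some b => rebuild b
       | none => v) = pts.foldl (pvGStep qs dsign onRay sel' sel upd) v := by
  intro pts
  induction pts with
  | nil => intro v; rfl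
  | cons pt rest ih =>
    intro v
    simp only [List.foldl_cons]
    by_cases hray : onRay pt = true
    · by_cases hcond : dsign * sel' pt > dsign * sel v ∧ dsign * sel' pt < dsign * qs
      · have hstep1 : pvScanStep dsign qs proj (sel v, none) pt = (sel' pt + dsign, some (sel' pt + dsign)) := by
          simp [pvScanStep, Hproj, hray, hcond.1, hcond.2]
        have hstep2 : pvGStep qs dsign onRay sel' sel upd v pt = upd pt := by
          unfold pvGStep; rw [if_pos ⟨hray, hcond⟩]
        have hv' : upd pt = rebuild (sel (upd pt)) := by
          rw [Hsel_upd pt hray]; exact Hupd pt hray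
        have hsel : sel (upd pt) = sel' pt + dsign := Hsel_upd pt hray
        rw [hstep1, hstep2, ← hsel]
        have h := pvScan_some qs dsign onRay sel' sel upd rebuild proj Hproj Hsel_upd Hupd Hselreb rest (upd pt) hv'
        rw [h.1]
        exact h.2.symm
      · have hstep1 : pvScanStep dsign qs proj (sel v, none) pt = (sel v, none) := by
          have h1 : ¬ (dsign * sel' pt > dsign * sel v ∧ dsign * sel' pt < dsign * qs) := hcond
          simp [pvScanStep, Hproj, hray]
          omega
        have hstep2 : pvGStep qs dsign onRay sel' sel upd v pt = v := by
          unfold pvGStep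
          rw [if_neg (fun hc => hcond hc.2)]
        rw [hstep1, hstep2]
        exact ih v
    · have hstep1 : pvScanStep dsign qs proj (sel v, none) pt = (sel v, none) := by
        simp [pvScanStep, Hproj, hray]
      have hstep2 : pvGStep qs dsign onRay sel' sel upd v pt = v := by
        unfold pvGStep
        rw [if_neg (fun hc => hray hc.1)]
      rw [hstep1, hstep2]
      exact ih v

def pvRayRow (qr : Int) (pt : Int × Int) : Bool := decide (pt.1 = qr)
def pvRayCol (qc : Int) (pt : Int × Int) : Bool := decide (pt.2 = qc)
def pvRayDiag (qr qc : Int) (pt : Int × Int) : Bool := decide (pt.1 - qr = pt.2 - qc)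
def pvRayAnti (qr qc : Int) (pt : Int × Int) : Bool := decide (pt.1 - qr = qc - pt.2)

def pvUpdL (pt : Int × Int) : Int × Int := (pt.1, pt.2 + 1)
def pvUpdR (pt : Int × Int) : Int × Int := (pt.1, pt.2 - 1)
def pvUpdT (pt : Int × Int) : Int × Int := (pt.1 + 1, pt.2)
def pvUpdB (pt : Int × Int) : Int × Int := (pt.1 - 1, pt.2)
def pvUpdTL (pt : Int × Int) : Int × Int := (pt.1 + 1, pt.2 + 1)
def pvUpdBR (pt : Int × Int) : Int × Int := (pt.1 - 1, pt.2 - 1)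
def pvUpdTR (pt : Int × Int) : Int × Int := (pt.1 + 1, pt.2 - 1)
def pvUpdBL (pt : Int × Int) : Int × Int := (pt.1 - 1, pt.2 + 1)

def pvStepL (qr qc : Int) : Int × Int → Int × Int → Int × Int := pvGStep qc 1 (pvRayRow qr) Prod.snd Prod.snd pvUpdL
def pvStepR (qr qc : Int) : Int × Int → Int × Int → Int × Int := pvGStep qc (-1) (pvRayRow qr) Prod.snd Prod.snd pvUpdR
def pvStepT (qr qc : Int) : Int × Int → Int × Int → Int × Int := pvGStep qr 1 (pvRayCol qc) Prod.fst Prod.fst pvUpdT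
def pvStepB (qr qc : Int) : Int × Int → Int × Int → Int × Int := pvGStep qr (-1) (pvRayCol qc) Prod.fst Prod.fst pvUpdB
def pvStepTL (qr qc : Int) : Int × Int → Int × Int → Int × Int := pvGStep qr 1 (pvRayDiag qr qc) Prod.fst Prod.fst pvUpdTL
def pvStepBR (qr qc : Int) : Int × Int → Int × Int → Int × Int := pvGStep qr (-1) (pvRayDiag qr qc) Prod.fst Prod.fst pvUpdBR
def pvStepTR (qr qc : Int) : Int × Int → Int × Int → Int × Int := pvGStep qr 1 (pvRayAnti qr qc) Prod.fst Prod.fst pvUpdTR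
def pvStepBL (qr qc : Int) : Int × Int → Int × Int → Int × Int := pvGStep qr (-1) (pvRayAnti qr qc) Prod.fst Prod.fst pvUpdBL


lemma pv_pyGet?_zero (a b : Int) (t : List Int) : PySem.List.pyGet? (a :: b :: t) 0 = some a := by
  simp [PySem.List.pyGet?, PySem.List.pyIdx?]
  rw [if_pos (by omega : (0:Int) ≤ (t.length:Int) + 1)]
  simp

lemma pv_pyGet?_one (a b : Int) (t : List Int) : PySem.List.pyGet? (a :: b :: t) 1 = some b := by
  simp [PySem.List.pyGet?, PySem.List.pyIdx?]

lemma pvStepA_eq (size qr qc : Int) (qb : PVDict) (a b : Int) (t : List Int) :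
    pvStepA size qr qc qb (a :: b :: t) =
      pvAntiGroup qr qc (size - a) (b - 1)
        (pvDiagGroup qr qc (size - a) (b - 1)
          (pvColGroup qr qc (size - a) (b - 1)
            (pvRowGroup qr qc (size - a) (b - 1) qb))) := by
  unfold pvStepA
  rw [pv_pyGet?_zero, pv_pyGet?_one]
  rfl

lemma pvScanL (qr qc : Int) (pts : List (Int × Int)) (v : Int × Int) :
    (match (pts.foldl (pvScanStep 1 qc (fun r c => if r = qr then some c else none)) (v.2, none)).2 with
     | some b => ((qr, b) : Int × Int)
     | none => v) = pts.foldl (pvStepL qr qc) v := by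
  exact pvScan_main qc 1 (pvRayRow qr) Prod.snd Prod.snd pvUpdL (fun ns => (qr, ns))
    (fun r c => if r = qr then some c else none)
    (by intro r c; simp [pvRayRow])
    (by intro pt hpt; rfl)
    (by intro pt hpt; simp [pvRayRow] at hpt; simp [pvUpdL, hpt])
    (by intro x; rfl) pts v

lemma pvScanR (qr qc : Int) (pts : List (Int × Int)) (v : Int × Int) :
    (match (pts.foldl (pvScanStep (-1) qc (fun r c => if r = qr then some c else none)) (v.2, none)).2 with
     | some b => ((qr, b) : Int × Int)
     | none => v) = pts.foldl (pvStepR qr qc) v := by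
  exact pvScan_main qc (-1) (pvRayRow qr) Prod.snd Prod.snd pvUpdR (fun ns => (qr, ns))
    (fun r c => if r = qr then some c else none)
    (by intro r c; simp [pvRayRow])
    (by intro pt hpt; simp [pvUpdR]; omega)
    (by intro pt hpt; simp [pvRayRow] at hpt; simp [pvUpdR, hpt, Prod.ext_iff]; omega)
    (by intro x; rfl) pts v

lemma pvScanT (qr qc : Int) (pts : List (Int × Int)) (v : Int × Int) :
    (match (pts.foldl (pvScanStep 1 qr (fun r c => if c = qc then some r else none)) (v.1, none)).2 with
     | some b => ((b, qc) : Int × Int)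
     | none => v) = pts.foldl (pvStepT qr qc) v := by
  exact pvScan_main qr 1 (pvRayCol qc) Prod.fst Prod.fst pvUpdT (fun ns => (ns, qc))
    (fun r c => if c = qc then some r else none)
    (by intro r c; simp [pvRayCol])
    (by intro pt hpt; rfl)
    (by intro pt hpt; simp [pvRayCol] at hpt; simp [pvUpdT, hpt])
    (by intro x; rfl) pts v

lemma pvScanB (qr qc : Int) (pts : List (Int × Int)) (v : Int × Int) :
    (match (pts.foldl (pvScanStep (-1) qr (fun r c => if c = qc then some r else none)) (v.1, none)).2 with
     | some b => ((b, qc) : Int × Int)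
     | none => v) = pts.foldl (pvStepB qr qc) v := by
  exact pvScan_main qr (-1) (pvRayCol qc) Prod.fst Prod.fst pvUpdB (fun ns => (ns, qc))
    (fun r c => if c = qc then some r else none)
    (by intro r c; simp [pvRayCol])
    (by intro pt hpt; simp [pvUpdB]; omega)
    (by intro pt hpt; simp [pvRayCol] at hpt; simp [pvUpdB, hpt, Prod.ext_iff]; omega)
    (by intro x; rfl) pts v

lemma pvScanTL (qr qc : Int) (pts : List (Int × Int)) (v : Int × Int) :
    (match (pts.foldl (pvScanStep 1 qr (fun r c => if r - qr = c - qc then some r else none)) (v.1, none)).2 with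
     | some b => ((b, qc + (b - qr)) : Int × Int)
     | none => v) = pts.foldl (pvStepTL qr qc) v := by
  exact pvScan_main qr 1 (pvRayDiag qr qc) Prod.fst Prod.fst pvUpdTL (fun ns => (ns, qc + (ns - qr)))
    (fun r c => if r - qr = c - qc then some r else none)
    (by intro r c; simp [pvRayDiag])
    (by intro pt hpt; rfl)
    (by intro pt hpt; simp [pvRayDiag] at hpt; simp [pvUpdTL, Prod.ext_iff]; omega)
    (by intro x; rfl) pts v

lemma pvScanBR (qr qc : Int) (pts : List (Int × Int)) (v : Int × Int) :
    (match (pts.foldl (pvScanStep (-1) qr (fun r c => if r - qr = c - qc then some r else none)) (v.1, none)).2 with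
     | some b => ((b, qc + (b - qr)) : Int × Int)
     | none => v) = pts.foldl (pvStepBR qr qc) v := by
  exact pvScan_main qr (-1) (pvRayDiag qr qc) Prod.fst Prod.fst pvUpdBR (fun ns => (ns, qc + (ns - qr)))
    (fun r c => if r - qr = c - qc then some r else none)
    (by intro r c; simp [pvRayDiag])
    (by intro pt hpt; simp [pvUpdBR]; omega)
    (by intro pt hpt; simp [pvRayDiag] at hpt; simp [pvUpdBR, Prod.ext_iff]; omega)
    (by intro x; rfl) pts v

lemma pvScanTR (qr qc : Int) (pts : List (Int × Int)) (v : Int × Int) :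
    (match (pts.foldl (pvScanStep 1 qr (fun r c => if r - qr = qc - c then some r else none)) (v.1, none)).2 with
     | some b => ((b, qc - (b - qr)) : Int × Int)
     | none => v) = pts.foldl (pvStepTR qr qc) v := by
  exact pvScan_main qr 1 (pvRayAnti qr qc) Prod.fst Prod.fst pvUpdTR (fun ns => (ns, qc - (ns - qr)))
    (fun r c => if r - qr = qc - c then some r else none)
    (by intro r c; simp [pvRayAnti])
    (by intro pt hpt; rfl)
    (by intro pt hpt; simp [pvRayAnti] at hpt; simp [pvUpdTR, Prod.ext_iff]; omega)
    (by intro x; rfl) pts v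

lemma pvScanBL (qr qc : Int) (pts : List (Int × Int)) (v : Int × Int) :
    (match (pts.foldl (pvScanStep (-1) qr (fun r c => if r - qr = qc - c then some r else none)) (v.1, none)).2 with
     | some b => ((b, qc - (b - qr)) : Int × Int)
     | none => v) = pts.foldl (pvStepBL qr qc) v := by
  exact pvScan_main qr (-1) (pvRayAnti qr qc) Prod.fst Prod.fst pvUpdBL (fun ns => (ns, qc - (ns - qr)))
    (fun r c => if r - qr = qc - c then some r else none)
    (by intro r c; simp [pvRayAnti])
    (by intro pt hpt; simp [pvUpdBL]; omega)
    (by intro pt hpt; simp [pvRayAnti] at hpt; simp [pvUpdBL, Prod.ext_iff]; omega)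
    (by intro x; rfl) pts v

lemma pvDoDir_eq (qr qc : Int) (pts : List (Int × Int)) (qb : PVDict)
    (key : String) (dsign : Int) (ax : Bool) (proj : Int → Int → Option Int) (rebuild : Int → Int × Int)
    (hk : key ∈ qb.keys) (hnd : qb.keys.Nodup) :
    pvDoDir qr qc pts qb (key, dsign, ax, proj, rebuild) =
      qb.insert key
        (match (pts.foldl (pvScanStep dsign (if ax then qc else qr) proj)
                 ((if ax then (qb.getD key (0, 0)).2 else (qb.getD key (0, 0)).1), none)).2 with
         | some best => rebuild best
         | none => qb.getD key (0, 0)) := by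
  have hc : qb.contains key = true := (PySem.Dict.contains_iff_mem_keys _ _).2 hk
  unfold pvDoDir
  cases hm : (pts.foldl (pvScanStep dsign (if ax then qc else qr) proj)
               ((if ax then (qb.getD key (0, 0)).2 else (qb.getD key (0, 0)).1), none)).2 with
  | some best => simp [hm, hc]
  | none => simp [hm, hc, pv_insert_getD_self qb hk hnd]

lemma pvDoDirL (qr qc : Int) (pts : List (Int × Int)) (qb : PVDict)
    (hk : "l" ∈ qb.keys) (hnd : qb.keys.Nodup) :
    pvDoDir qr qc pts qb ("l", 1, true, fun r c => if r = qr then some c else none, fun ns => (qr, ns)) =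
      qb.insert "l" (pts.foldl (pvStepL qr qc) (qb.getD "l" (0, 0))) := by
  rw [pvDoDir_eq qr qc pts qb "l" 1 true _ _ hk hnd]
  congr 1
  have h := pvScanL qr qc pts (qb.getD "l" (0, 0))
  simpa using h

lemma pvDoDirR (qr qc : Int) (pts : List (Int × Int)) (qb : PVDict)
    (hk : "r" ∈ qb.keys) (hnd : qb.keys.Nodup) :
    pvDoDir qr qc pts qb ("r", -1, true, fun r c => if r = qr then some c else none, fun ns => (qr, ns)) =
      qb.insert "r" (pts.foldl (pvStepR qr qc) (qb.getD "r" (0, 0))) := by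
  rw [pvDoDir_eq qr qc pts qb "r" (-1) true _ _ hk hnd]
  congr 1
  have h := pvScanR qr qc pts (qb.getD "r" (0, 0))
  simpa using h

lemma pvDoDirT (qr qc : Int) (pts : List (Int × Int)) (qb : PVDict)
    (hk : "t" ∈ qb.keys) (hnd : qb.keys.Nodup) :
    pvDoDir qr qc pts qb ("t", 1, false, fun r c => if c = qc then some r else none, fun ns => (ns, qc)) =
      qb.insert "t" (pts.foldl (pvStepT qr qc) (qb.getD "t" (0, 0))) := by
  rw [pvDoDir_eq qr qc pts qb "t" 1 false _ _ hk hnd]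
  congr 1
  have h := pvScanT qr qc pts (qb.getD "t" (0, 0))
  simpa using h

lemma pvDoDirB (qr qc : Int) (pts : List (Int × Int)) (qb : PVDict)
    (hk : "b" ∈ qb.keys) (hnd : qb.keys.Nodup) :
    pvDoDir qr qc pts qb ("b", -1, false, fun r c => if c = qc then some r else none, fun ns => (ns, qc)) =
      qb.insert "b" (pts.foldl (pvStepB qr qc) (qb.getD "b" (0, 0))) := by
  rw [pvDoDir_eq qr qc pts qb "b" (-1) false _ _ hk hnd]
  congr 1
  have h := pvScanB qr qc pts (qb.getD "b" (0, 0))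
  simpa using h

lemma pvDoDirTL (qr qc : Int) (pts : List (Int × Int)) (qb : PVDict)
    (hk : "tl" ∈ qb.keys) (hnd : qb.keys.Nodup) :
    pvDoDir qr qc pts qb ("tl", 1, false, fun r c => if r - qr = c - qc then some r else none, fun ns => (ns, qc + (ns - qr))) =
      qb.insert "tl" (pts.foldl (pvStepTL qr qc) (qb.getD "tl" (0, 0))) := by
  rw [pvDoDir_eq qr qc pts qb "tl" 1 false _ _ hk hnd]
  congr 1
  have h := pvScanTL qr qc pts (qb.getD "tl" (0, 0))
  simpa using h

lemma pvDoDirBR (qr qc : Int) (pts : List (Int × Int)) (qb : PVDict)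
    (hk : "br" ∈ qb.keys) (hnd : qb.keys.Nodup) :
    pvDoDir qr qc pts qb ("br", -1, false, fun r c => if r - qr = c - qc then some r else none, fun ns => (ns, qc + (ns - qr))) =
      qb.insert "br" (pts.foldl (pvStepBR qr qc) (qb.getD "br" (0, 0))) := by
  rw [pvDoDir_eq qr qc pts qb "br" (-1) false _ _ hk hnd]
  congr 1
  have h := pvScanBR qr qc pts (qb.getD "br" (0, 0))
  simpa using h

lemma pvDoDirTR (qr qc : Int) (pts : List (Int × Int)) (qb : PVDict)
    (hk : "tr" ∈ qb.keys) (hnd : qb.keys.Nodup) :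
    pvDoDir qr qc pts qb ("tr", 1, false, fun r c => if r - qr = qc - c then some r else none, fun ns => (ns, qc - (ns - qr))) =
      qb.insert "tr" (pts.foldl (pvStepTR qr qc) (qb.getD "tr" (0, 0))) := by
  rw [pvDoDir_eq qr qc pts qb "tr" 1 false _ _ hk hnd]
  congr 1
  have h := pvScanTR qr qc pts (qb.getD "tr" (0, 0))
  simpa using h

lemma pvDoDirBL (qr qc : Int) (pts : List (Int × Int)) (qb : PVDict)
    (hk : "bl" ∈ qb.keys) (hnd : qb.keys.Nodup) :
    pvDoDir qr qc pts qb ("bl", -1, false, fun r c => if r - qr = qc - c then some r else none, fun ns => (ns, qc - (ns - qr))) =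
      qb.insert "bl" (pts.foldl (pvStepBL qr qc) (qb.getD "bl" (0, 0))) := by
  rw [pvDoDir_eq qr qc pts qb "bl" (-1) false _ _ hk hnd]
  congr 1
  have h := pvScanBL qr qc pts (qb.getD "bl" (0, 0))
  simpa using h

lemma pvRow_items (qr qc orow ocol : Int) (qb : PVDict)
    (hpres : orow = qr → ("l" ∈ qb.keys ∧ "r" ∈ qb.keys)) (hnd : qb.keys.Nodup) :
    (pvRowGroup qr qc orow ocol qb).items =
      qb.items.map (fun p =>
        (p.1, if p.1 = "l" then pvStepL qr qc p.2 (orow, ocol)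
              else if p.1 = "r" then pvStepR qr qc p.2 (orow, ocol) else p.2)) := by
  unfold pvRowGroup
  split_ifs with h1 h2 h3
  · rw [PySem.Dict.items_insert_of_contains _ _ ((PySem.Dict.contains_iff_mem_keys _ _).2 (hpres h1).1)]
    refine List.map_congr_left ?_
    rintro ⟨pk, pv⟩ hmem
    have hv := PySem.Dict.getD_of_mem_items qb hmem hnd (0, 0)
    by_cases e1 : pk = "l"
    · subst e1
      rw [hv] at h2
      have hstep : pvStepL qr qc pv (orow, ocol) = (orow, ocol + 1) := by
        unfold pvStepL pvGStep pvRayRow pvUpdL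
        rw [if_pos (by simp only [decide_eq_true_eq]; omega)]
      simp [hstep]
    · by_cases e2 : pk = "r"
      · subst e2
        have hstep : pvStepR qr qc pv (orow, ocol) = pv := by
          unfold pvStepR pvGStep pvRayRow pvUpdR
          rw [if_neg (by simp only [decide_eq_true_eq]; omega)]
        simp [e1, hstep]
      · simp [e1, e2]
  · rw [PySem.Dict.items_insert_of_contains _ _ ((PySem.Dict.contains_iff_mem_keys _ _).2 (hpres h1).2)]
    refine List.map_congr_left ?_
    rintro ⟨pk, pv⟩ hmem
    have hv := PySem.Dict.getD_of_mem_items qb hmem hnd (0, 0)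
    by_cases e1 : pk = "l"
    · subst e1
      rw [hv] at h2
      have hstep : pvStepL qr qc pv (orow, ocol) = pv := by
        unfold pvStepL pvGStep pvRayRow pvUpdL
        rw [if_neg (by simp only [decide_eq_true_eq]; omega)]
      simp [hstep]
    · by_cases e2 : pk = "r"
      · subst e2
        rw [hv] at h3
        have hstep : pvStepR qr qc pv (orow, ocol) = (orow, ocol - 1) := by
          unfold pvStepR pvGStep pvRayRow pvUpdR
          rw [if_pos (by simp only [decide_eq_true_eq]; omega)]
        simp [e1, hstep]
      · simp [e1, e2]
  · conv_lhs => rw [← List.map_id qb.items]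
    refine List.map_congr_left ?_
    rintro ⟨pk, pv⟩ hmem
    have hv := PySem.Dict.getD_of_mem_items qb hmem hnd (0, 0)
    by_cases e1 : pk = "l"
    · subst e1
      rw [hv] at h2
      have hstep : pvStepL qr qc pv (orow, ocol) = pv := by
        unfold pvStepL pvGStep pvRayRow pvUpdL
        rw [if_neg (by simp only [decide_eq_true_eq]; omega)]
      simp [hstep]
    · by_cases e2 : pk = "r"
      · subst e2
        rw [hv] at h3
        have hstep : pvStepR qr qc pv (orow, ocol) = pv := by
          unfold pvStepR pvGStep pvRayRow pvUpdR
          rw [if_neg (by simp only [decide_eq_true_eq]; omega)]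
        simp [e1, hstep]
      · simp [e1, e2]
  · conv_lhs => rw [← List.map_id qb.items]
    refine List.map_congr_left ?_
    rintro ⟨pk, pv⟩ hmem
    by_cases e1 : pk = "l"
    · subst e1
      have hstep : pvStepL qr qc pv (orow, ocol) = pv := by
        unfold pvStepL pvGStep pvRayRow pvUpdL
        rw [if_neg (by simp only [decide_eq_true_eq]; omega)]
      simp [hstep]
    · by_cases e2 : pk = "r"
      · subst e2
        have hstep : pvStepR qr qc pv (orow, ocol) = pv := by
          unfold pvStepR pvGStep pvRayRow pvUpdR
          rw [if_neg (by simp only [decide_eq_true_eq]; omega)]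
        simp [e1, hstep]
      · simp [e1, e2]

lemma pvRow_keysC (qr qc orow ocol : Int) (qb : PVDict)
    (hpres : orow = qr → ("l" ∈ qb.keys ∧ "r" ∈ qb.keys)) :
    (pvRowGroup qr qc orow ocol qb).keys = qb.keys := by
  unfold pvRowGroup
  split_ifs with h1 h2 h3
  · exact PySem.Dict.keys_insert_of_contains _ _ ((PySem.Dict.contains_iff_mem_keys _ _).2 (hpres h1).1)
  · exact PySem.Dict.keys_insert_of_contains _ _ ((PySem.Dict.contains_iff_mem_keys _ _).2 (hpres h1).2)
  · rfl
  · rfl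

lemma pvCol_items (qr qc orow ocol : Int) (qb : PVDict)
    (hpres : ocol = qc → ("t" ∈ qb.keys ∧ "b" ∈ qb.keys)) (hnd : qb.keys.Nodup) :
    (pvColGroup qr qc orow ocol qb).items =
      qb.items.map (fun p =>
        (p.1, if p.1 = "t" then pvStepT qr qc p.2 (orow, ocol)
              else if p.1 = "b" then pvStepB qr qc p.2 (orow, ocol) else p.2)) := by
  unfold pvColGroup
  split_ifs with h1 h2 h3
  · rw [PySem.Dict.items_insert_of_contains _ _ ((PySem.Dict.contains_iff_mem_keys _ _).2 (hpres h1).1)]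
    refine List.map_congr_left ?_
    rintro ⟨pk, pv⟩ hmem
    have hv := PySem.Dict.getD_of_mem_items qb hmem hnd (0, 0)
    by_cases e1 : pk = "t"
    · subst e1
      rw [hv] at h2
      have hstep : pvStepT qr qc pv (orow, ocol) = (orow + 1, ocol) := by
        unfold pvStepT pvGStep pvRayCol pvUpdT
        rw [if_pos (by simp only [decide_eq_true_eq]; omega)]
      simp [hstep]
    · by_cases e2 : pk = "b"
      · subst e2
        have hstep : pvStepB qr qc pv (orow, ocol) = pv := by
          unfold pvStepB pvGStep pvRayCol pvUpdB
          rw [if_neg (by simp only [decide_eq_true_eq]; omega)]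
        simp [e1, hstep]
      · simp [e1, e2]
  · rw [PySem.Dict.items_insert_of_contains _ _ ((PySem.Dict.contains_iff_mem_keys _ _).2 (hpres h1).2)]
    refine List.map_congr_left ?_
    rintro ⟨pk, pv⟩ hmem
    have hv := PySem.Dict.getD_of_mem_items qb hmem hnd (0, 0)
    by_cases e1 : pk = "t"
    · subst e1
      rw [hv] at h2
      have hstep : pvStepT qr qc pv (orow, ocol) = pv := by
        unfold pvStepT pvGStep pvRayCol pvUpdT
        rw [if_neg (by simp only [decide_eq_true_eq]; omega)]
      simp [hstep]
    · by_cases e2 : pk = "b"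
      · subst e2
        rw [hv] at h3
        have hstep : pvStepB qr qc pv (orow, ocol) = (orow - 1, ocol) := by
          unfold pvStepB pvGStep pvRayCol pvUpdB
          rw [if_pos (by simp only [decide_eq_true_eq]; omega)]
        simp [e1, hstep]
      · simp [e1, e2]
  · conv_lhs => rw [← List.map_id qb.items]
    refine List.map_congr_left ?_
    rintro ⟨pk, pv⟩ hmem
    have hv := PySem.Dict.getD_of_mem_items qb hmem hnd (0, 0)
    by_cases e1 : pk = "t"
    · subst e1
      rw [hv] at h2
      have hstep : pvStepT qr qc pv (orow, ocol) = pv := by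
        unfold pvStepT pvGStep pvRayCol pvUpdT
        rw [if_neg (by simp only [decide_eq_true_eq]; omega)]
      simp [hstep]
    · by_cases e2 : pk = "b"
      · subst e2
        rw [hv] at h3
        have hstep : pvStepB qr qc pv (orow, ocol) = pv := by
          unfold pvStepB pvGStep pvRayCol pvUpdB
          rw [if_neg (by simp only [decide_eq_true_eq]; omega)]
        simp [e1, hstep]
      · simp [e1, e2]
  · conv_lhs => rw [← List.map_id qb.items]
    refine List.map_congr_left ?_
    rintro ⟨pk, pv⟩ hmem
    by_cases e1 : pk = "t"
    · subst e1
      have hstep : pvStepT qr qc pv (orow, ocol) = pv := by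
        unfold pvStepT pvGStep pvRayCol pvUpdT
        rw [if_neg (by simp only [decide_eq_true_eq]; omega)]
      simp [hstep]
    · by_cases e2 : pk = "b"
      · subst e2
        have hstep : pvStepB qr qc pv (orow, ocol) = pv := by
          unfold pvStepB pvGStep pvRayCol pvUpdB
          rw [if_neg (by simp only [decide_eq_true_eq]; omega)]
        simp [e1, hstep]
      · simp [e1, e2]

lemma pvCol_keysC (qr qc orow ocol : Int) (qb : PVDict)
    (hpres : ocol = qc → ("t" ∈ qb.keys ∧ "b" ∈ qb.keys)) :
    (pvColGroup qr qc orow ocol qb).keys = qb.keys := by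
  unfold pvColGroup
  split_ifs with h1 h2 h3
  · exact PySem.Dict.keys_insert_of_contains _ _ ((PySem.Dict.contains_iff_mem_keys _ _).2 (hpres h1).1)
  · exact PySem.Dict.keys_insert_of_contains _ _ ((PySem.Dict.contains_iff_mem_keys _ _).2 (hpres h1).2)
  · rfl
  · rfl

lemma pvDiag_items (qr qc orow ocol : Int) (qb : PVDict)
    (hpres : orow - qr = ocol - qc → ("tl" ∈ qb.keys ∧ "br" ∈ qb.keys)) (hnd : qb.keys.Nodup) :
    (pvDiagGroup qr qc orow ocol qb).items =
      qb.items.map (fun p =>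
        (p.1, if p.1 = "tl" then pvStepTL qr qc p.2 (orow, ocol)
              else if p.1 = "br" then pvStepBR qr qc p.2 (orow, ocol) else p.2)) := by
  unfold pvDiagGroup
  split_ifs with h1 h2 h3
  · rw [PySem.Dict.items_insert_of_contains _ _ ((PySem.Dict.contains_iff_mem_keys _ _).2 (hpres h1).1)]
    refine List.map_congr_left ?_
    rintro ⟨pk, pv⟩ hmem
    have hv := PySem.Dict.getD_of_mem_items qb hmem hnd (0, 0)
    by_cases e1 : pk = "tl"
    · subst e1
      rw [hv] at h2
      have hstep : pvStepTL qr qc pv (orow, ocol) = (orow + 1, ocol + 1) := by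
        unfold pvStepTL pvGStep pvRayDiag pvUpdTL
        rw [if_pos (by simp only [decide_eq_true_eq]; omega)]
      simp [hstep]
    · by_cases e2 : pk = "br"
      · subst e2
        have hstep : pvStepBR qr qc pv (orow, ocol) = pv := by
          unfold pvStepBR pvGStep pvRayDiag pvUpdBR
          rw [if_neg (by simp only [decide_eq_true_eq]; omega)]
        simp [e1, hstep]
      · simp [e1, e2]
  · rw [PySem.Dict.items_insert_of_contains _ _ ((PySem.Dict.contains_iff_mem_keys _ _).2 (hpres h1).2)]
    refine List.map_congr_left ?_
    rintro ⟨pk, pv⟩ hmem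
    have hv := PySem.Dict.getD_of_mem_items qb hmem hnd (0, 0)
    by_cases e1 : pk = "tl"
    · subst e1
      rw [hv] at h2
      have hstep : pvStepTL qr qc pv (orow, ocol) = pv := by
        unfold pvStepTL pvGStep pvRayDiag pvUpdTL
        rw [if_neg (by simp only [decide_eq_true_eq]; omega)]
      simp [hstep]
    · by_cases e2 : pk = "br"
      · subst e2
        rw [hv] at h3
        have hstep : pvStepBR qr qc pv (orow, ocol) = (orow - 1, ocol - 1) := by
          unfold pvStepBR pvGStep pvRayDiag pvUpdBR
          rw [if_pos (by simp only [decide_eq_true_eq]; omega)]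
        simp [e1, hstep]
      · simp [e1, e2]
  · conv_lhs => rw [← List.map_id qb.items]
    refine List.map_congr_left ?_
    rintro ⟨pk, pv⟩ hmem
    have hv := PySem.Dict.getD_of_mem_items qb hmem hnd (0, 0)
    by_cases e1 : pk = "tl"
    · subst e1
      rw [hv] at h2
      have hstep : pvStepTL qr qc pv (orow, ocol) = pv := by
        unfold pvStepTL pvGStep pvRayDiag pvUpdTL
        rw [if_neg (by simp only [decide_eq_true_eq]; omega)]
      simp [hstep]
    · by_cases e2 : pk = "br"
      · subst e2
        rw [hv] at h3
        have hstep : pvStepBR qr qc pv (orow, ocol) = pv := by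
          unfold pvStepBR pvGStep pvRayDiag pvUpdBR
          rw [if_neg (by simp only [decide_eq_true_eq]; omega)]
        simp [e1, hstep]
      · simp [e1, e2]
  · conv_lhs => rw [← List.map_id qb.items]
    refine List.map_congr_left ?_
    rintro ⟨pk, pv⟩ hmem
    by_cases e1 : pk = "tl"
    · subst e1
      have hstep : pvStepTL qr qc pv (orow, ocol) = pv := by
        unfold pvStepTL pvGStep pvRayDiag pvUpdTL
        rw [if_neg (by simp only [decide_eq_true_eq]; omega)]
      simp [hstep]
    · by_cases e2 : pk = "br"
      · subst e2
        have hstep : pvStepBR qr qc pv (orow, ocol) = pv := by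
          unfold pvStepBR pvGStep pvRayDiag pvUpdBR
          rw [if_neg (by simp only [decide_eq_true_eq]; omega)]
        simp [e1, hstep]
      · simp [e1, e2]

lemma pvDiag_keysC (qr qc orow ocol : Int) (qb : PVDict)
    (hpres : orow - qr = ocol - qc → ("tl" ∈ qb.keys ∧ "br" ∈ qb.keys)) :
    (pvDiagGroup qr qc orow ocol qb).keys = qb.keys := by
  unfold pvDiagGroup
  split_ifs with h1 h2 h3
  · exact PySem.Dict.keys_insert_of_contains _ _ ((PySem.Dict.contains_iff_mem_keys _ _).2 (hpres h1).1)
  · exact PySem.Dict.keys_insert_of_contains _ _ ((PySem.Dict.contains_iff_mem_keys _ _).2 (hpres h1).2)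
  · rfl
  · rfl

lemma pvAnti_items (qr qc orow ocol : Int) (qb : PVDict)
    (hpres : orow - qr = -(ocol - qc) → ("tr" ∈ qb.keys ∧ "bl" ∈ qb.keys)) (hnd : qb.keys.Nodup) :
    (pvAntiGroup qr qc orow ocol qb).items =
      qb.items.map (fun p =>
        (p.1, if p.1 = "tr" then pvStepTR qr qc p.2 (orow, ocol)
              else if p.1 = "bl" then pvStepBL qr qc p.2 (orow, ocol) else p.2)) := by
  unfold pvAntiGroup
  split_ifs with h1 h2 h3
  · rw [PySem.Dict.items_insert_of_contains _ _ ((PySem.Dict.contains_iff_mem_keys _ _).2 (hpres h1).1)]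
    refine List.map_congr_left ?_
    rintro ⟨pk, pv⟩ hmem
    have hv := PySem.Dict.getD_of_mem_items qb hmem hnd (0, 0)
    by_cases e1 : pk = "tr"
    · subst e1
      rw [hv] at h2
      have hstep : pvStepTR qr qc pv (orow, ocol) = (orow + 1, ocol - 1) := by
        unfold pvStepTR pvGStep pvRayAnti pvUpdTR
        rw [if_pos (by simp only [decide_eq_true_eq]; omega)]
      simp [hstep]
    · by_cases e2 : pk = "bl"
      · subst e2
        have hstep : pvStepBL qr qc pv (orow, ocol) = pv := by
          unfold pvStepBL pvGStep pvRayAnti pvUpdBL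
          rw [if_neg (by simp only [decide_eq_true_eq]; omega)]
        simp [e1, hstep]
      · simp [e1, e2]
  · rw [PySem.Dict.items_insert_of_contains _ _ ((PySem.Dict.contains_iff_mem_keys _ _).2 (hpres h1).2)]
    refine List.map_congr_left ?_
    rintro ⟨pk, pv⟩ hmem
    have hv := PySem.Dict.getD_of_mem_items qb hmem hnd (0, 0)
    by_cases e1 : pk = "tr"
    · subst e1
      rw [hv] at h2
      have hstep : pvStepTR qr qc pv (orow, ocol) = pv := by
        unfold pvStepTR pvGStep pvRayAnti pvUpdTR
        rw [if_neg (by simp only [decide_eq_true_eq]; omega)]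
      simp [hstep]
    · by_cases e2 : pk = "bl"
      · subst e2
        rw [hv] at h3
        have hstep : pvStepBL qr qc pv (orow, ocol) = (orow - 1, ocol + 1) := by
          unfold pvStepBL pvGStep pvRayAnti pvUpdBL
          rw [if_pos (by simp only [decide_eq_true_eq]; omega)]
        simp [e1, hstep]
      · simp [e1, e2]
  · conv_lhs => rw [← List.map_id qb.items]
    refine List.map_congr_left ?_
    rintro ⟨pk, pv⟩ hmem
    have hv := PySem.Dict.getD_of_mem_items qb hmem hnd (0, 0)
    by_cases e1 : pk = "tr"
    · subst e1
      rw [hv] at h2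
      have hstep : pvStepTR qr qc pv (orow, ocol) = pv := by
        unfold pvStepTR pvGStep pvRayAnti pvUpdTR
        rw [if_neg (by simp only [decide_eq_true_eq]; omega)]
      simp [hstep]
    · by_cases e2 : pk = "bl"
      · subst e2
        rw [hv] at h3
        have hstep : pvStepBL qr qc pv (orow, ocol) = pv := by
          unfold pvStepBL pvGStep pvRayAnti pvUpdBL
          rw [if_neg (by simp only [decide_eq_true_eq]; omega)]
        simp [e1, hstep]
      · simp [e1, e2]
  · conv_lhs => rw [← List.map_id qb.items]
    refine List.map_congr_left ?_
    rintro ⟨pk, pv⟩ hmem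
    by_cases e1 : pk = "tr"
    · subst e1
      have hstep : pvStepTR qr qc pv (orow, ocol) = pv := by
        unfold pvStepTR pvGStep pvRayAnti pvUpdTR
        rw [if_neg (by simp only [decide_eq_true_eq]; omega)]
      simp [hstep]
    · by_cases e2 : pk = "bl"
      · subst e2
        have hstep : pvStepBL qr qc pv (orow, ocol) = pv := by
          unfold pvStepBL pvGStep pvRayAnti pvUpdBL
          rw [if_neg (by simp only [decide_eq_true_eq]; omega)]
        simp [e1, hstep]
      · simp [e1, e2]

lemma pvAnti_keysC (qr qc orow ocol : Int) (qb : PVDict)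
    (hpres : orow - qr = -(ocol - qc) → ("tr" ∈ qb.keys ∧ "bl" ∈ qb.keys)) :
    (pvAntiGroup qr qc orow ocol qb).keys = qb.keys := by
  unfold pvAntiGroup
  split_ifs with h1 h2 h3
  · exact PySem.Dict.keys_insert_of_contains _ _ ((PySem.Dict.contains_iff_mem_keys _ _).2 (hpres h1).1)
  · exact PySem.Dict.keys_insert_of_contains _ _ ((PySem.Dict.contains_iff_mem_keys _ _).2 (hpres h1).2)
  · rfl
  · rfl

def pvFinal1 (qr qc : Int) (pt : Int × Int) (k : String) (v : Int × Int) : Int × Int :=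
  if k = "l" then pvStepL qr qc v pt
  else if k = "r" then pvStepR qr qc v pt
  else if k = "t" then pvStepT qr qc v pt
  else if k = "b" then pvStepB qr qc v pt
  else if k = "tl" then pvStepTL qr qc v pt
  else if k = "br" then pvStepBR qr qc v pt
  else if k = "tr" then pvStepTR qr qc v pt
  else if k = "bl" then pvStepBL qr qc v pt
  else v

def pvFinal (qr qc : Int) (pts : List (Int × Int)) (k : String) (v : Int × Int) : Int × Int :=
  if k = "l" then pts.foldl (pvStepL qr qc) v
  else if k = "r" then pts.foldl (pvStepR qr qc) v
  else if k = "t" then pts.foldl (pvStepT qr qc) v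
  else if k = "b" then pts.foldl (pvStepB qr qc) v
  else if k = "tl" then pts.foldl (pvStepTL qr qc) v
  else if k = "br" then pts.foldl (pvStepBR qr qc) v
  else if k = "tr" then pts.foldl (pvStepTR qr qc) v
  else if k = "bl" then pts.foldl (pvStepBL qr qc) v
  else v

lemma pvFinal_nil (qr qc : Int) (k : String) (v : Int × Int) : pvFinal qr qc [] k v = v := by
  unfold pvFinal
  split_ifs <;> rfl

lemma pvFinal_cons (qr qc : Int) (pt : Int × Int) (pts : List (Int × Int)) (k : String) (v : Int × Int) :
    pvFinal qr qc (pt :: pts) k v = pvFinal qr qc pts k (pvFinal1 qr qc pt k v) := by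
  unfold pvFinal pvFinal1
  split_ifs <;> rfl

lemma pvStepA_items (size qr qc : Int) (qb : PVDict) (a b : Int) (rest0 : List Int)
    (hR : size - a = qr → ("l" ∈ qb.keys ∧ "r" ∈ qb.keys))
    (hC : b - 1 = qc → ("t" ∈ qb.keys ∧ "b" ∈ qb.keys))
    (hD : (size - a) - qr = (b - 1) - qc → ("tl" ∈ qb.keys ∧ "br" ∈ qb.keys))
    (hN : (size - a) - qr = -((b - 1) - qc) → ("tr" ∈ qb.keys ∧ "bl" ∈ qb.keys))
    (hnd : qb.keys.Nodup) :
    (pvStepA size qr qc qb (a :: b :: rest0)).items =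
      qb.items.map (fun p => (p.1, pvFinal1 qr qc (size - a, b - 1) p.1 p.2)) := by
  have k1 : (pvRowGroup qr qc (size - a) (b - 1) qb).keys = qb.keys :=
    pvRow_keysC _ _ _ _ _ hR
  have hC1 : b - 1 = qc →
      ("t" ∈ (pvRowGroup qr qc (size - a) (b - 1) qb).keys ∧
       "b" ∈ (pvRowGroup qr qc (size - a) (b - 1) qb).keys) := by
    intro h; rw [k1]; exact hC h
  have k2 : (pvColGroup qr qc (size - a) (b - 1) (pvRowGroup qr qc (size - a) (b - 1) qb)).keys = qb.keys := by
    rw [pvCol_keysC _ _ _ _ _ hC1]; exact k1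
  have hD1 : (size - a) - qr = (b - 1) - qc →
      ("tl" ∈ (pvColGroup qr qc (size - a) (b - 1) (pvRowGroup qr qc (size - a) (b - 1) qb)).keys ∧
       "br" ∈ (pvColGroup qr qc (size - a) (b - 1) (pvRowGroup qr qc (size - a) (b - 1) qb)).keys) := by
    intro h; rw [k2]; exact hD h
  have k3 : (pvDiagGroup qr qc (size - a) (b - 1)
      (pvColGroup qr qc (size - a) (b - 1) (pvRowGroup qr qc (size - a) (b - 1) qb))).keys = qb.keys := by
    rw [pvDiag_keysC _ _ _ _ _ hD1]; exact k2
  have hN1 : (size - a) - qr = -((b - 1) - qc) →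
      ("tr" ∈ (pvDiagGroup qr qc (size - a) (b - 1)
          (pvColGroup qr qc (size - a) (b - 1) (pvRowGroup qr qc (size - a) (b - 1) qb))).keys ∧
       "bl" ∈ (pvDiagGroup qr qc (size - a) (b - 1)
          (pvColGroup qr qc (size - a) (b - 1) (pvRowGroup qr qc (size - a) (b - 1) qb))).keys) := by
    intro h; rw [k3]; exact hN h
  have nd1 : (pvRowGroup qr qc (size - a) (b - 1) qb).keys.Nodup := by rw [k1]; exact hnd
  have nd2 : (pvColGroup qr qc (size - a) (b - 1) (pvRowGroup qr qc (size - a) (b - 1) qb)).keys.Nodup := by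
    rw [k2]; exact hnd
  have nd3 : (pvDiagGroup qr qc (size - a) (b - 1)
      (pvColGroup qr qc (size - a) (b - 1) (pvRowGroup qr qc (size - a) (b - 1) qb))).keys.Nodup := by
    rw [k3]; exact hnd
  rw [pvStepA_eq, pvAnti_items _ _ _ _ _ hN1 nd3, pvDiag_items _ _ _ _ _ hD1 nd2,
      pvCol_items _ _ _ _ _ hC1 nd1, pvRow_items _ _ _ _ _ hR hnd]
  simp only [List.map_map]
  refine List.map_congr_left ?_
  rintro ⟨pk, pv⟩ _
  by_cases e1 : pk = "l"
  · subst e1; simp [pvFinal1, Function.comp]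
  · by_cases e2 : pk = "r"
    · subst e2; simp [pvFinal1, Function.comp]
    · by_cases e3 : pk = "t"
      · subst e3; simp [pvFinal1, Function.comp]
      · by_cases e4 : pk = "b"
        · subst e4; simp [pvFinal1, Function.comp]
        · by_cases e5 : pk = "tl"
          · subst e5; simp [pvFinal1, Function.comp]
          · by_cases e6 : pk = "br"
            · subst e6; simp [pvFinal1, Function.comp]
            · by_cases e7 : pk = "tr"
              · subst e7; simp [pvFinal1, Function.comp]
              · by_cases e8 : pk = "bl"
                · subst e8; simp [pvFinal1, Function.comp]
                · simp [pvFinal1, Function.comp, e1, e2, e3, e4, e5, e6, e7, e8]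

lemma pvStepA_keysC (size qr qc : Int) (qb : PVDict) (a b : Int) (rest0 : List Int)
    (hR : size - a = qr → ("l" ∈ qb.keys ∧ "r" ∈ qb.keys))
    (hC : b - 1 = qc → ("t" ∈ qb.keys ∧ "b" ∈ qb.keys))
    (hD : (size - a) - qr = (b - 1) - qc → ("tl" ∈ qb.keys ∧ "br" ∈ qb.keys))
    (hN : (size - a) - qr = -((b - 1) - qc) → ("tr" ∈ qb.keys ∧ "bl" ∈ qb.keys)) :
    (pvStepA size qr qc qb (a :: b :: rest0)).keys = qb.keys := by
  have k1 : (pvRowGroup qr qc (size - a) (b - 1) qb).keys = qb.keys :=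
    pvRow_keysC _ _ _ _ _ hR
  have k2 : (pvColGroup qr qc (size - a) (b - 1) (pvRowGroup qr qc (size - a) (b - 1) qb)).keys = qb.keys := by
    rw [pvCol_keysC _ _ _ _ _ (by intro h; rw [k1]; exact hC h)]; exact k1
  have k3 : (pvDiagGroup qr qc (size - a) (b - 1)
      (pvColGroup qr qc (size - a) (b - 1) (pvRowGroup qr qc (size - a) (b - 1) qb))).keys = qb.keys := by
    rw [pvDiag_keysC _ _ _ _ _ (by intro h; rw [k2]; exact hD h)]; exact k2
  rw [pvStepA_eq, pvAnti_keysC _ _ _ _ _ (by intro h; rw [k3]; exact hN h)]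
  exact k3

lemma pvA_char (size qr qc : Int) (obs : List (List Int)) :
    ∀ qb : PVDict, qb.keys.Nodup →
    ((∃ ob ∈ obs, size - (PySem.List.pyGet? ob 0).getD 0 = qr) → ("l" ∈ qb.keys ∧ "r" ∈ qb.keys)) →
    ((∃ ob ∈ obs, (PySem.List.pyGet? ob 1).getD 0 - 1 = qc) → ("t" ∈ qb.keys ∧ "b" ∈ qb.keys)) →
    ((∃ ob ∈ obs, (size - (PySem.List.pyGet? ob 0).getD 0) - qr = ((PySem.List.pyGet? ob 1).getD 0 - 1) - qc) → ("tl" ∈ qb.keys ∧ "br" ∈ qb.keys)) →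
    ((∃ ob ∈ obs, (size - (PySem.List.pyGet? ob 0).getD 0) - qr = qc - ((PySem.List.pyGet? ob 1).getD 0 - 1)) → ("tr" ∈ qb.keys ∧ "bl" ∈ qb.keys)) →
    (∀ ob ∈ obs, 2 ≤ ob.length) →
    (obs.foldl (pvStepA size qr qc) qb).items =
      qb.items.map (fun p => (p.1,
        pvFinal qr qc (obs.map (fun ob => convert_py size ((PySem.List.pyGet? ob 0).getD 0) ((PySem.List.pyGet? ob 1).getD 0))) p.1 p.2)) := by
  induction obs with
  | nil =>
    intro qb hnd _ _ _ _ _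
    simp only [List.foldl_nil, List.map_nil]
    conv_lhs => rw [← List.map_id qb.items]
    refine List.map_congr_left ?_
    rintro ⟨pk, pv⟩ _
    simp [pvFinal_nil]
  | cons ob rest ih =>
    intro qb hnd hR hC hD hN hlen
    obtain ⟨a, b, rest0, rfl⟩ : ∃ a b rest0, ob = a :: b :: rest0 := by
      have h2 := hlen ob (List.mem_cons_self ..)
      match ob, h2 with
      | a :: b :: rest0, _ => exact ⟨a, b, rest0, rfl⟩
    have hpt0 : (PySem.List.pyGet? (a :: b :: rest0) 0).getD 0 = a := by
      rw [pv_pyGet?_zero]; rfl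
    have hpt1 : (PySem.List.pyGet? (a :: b :: rest0) 1).getD 0 = b := by
      rw [pv_pyGet?_one]; rfl
    have hR1 : size - a = qr → ("l" ∈ qb.keys ∧ "r" ∈ qb.keys) := by
      intro h; exact hR ⟨_, List.mem_cons_self .., by rw [hpt0]; exact h⟩
    have hC1 : b - 1 = qc → ("t" ∈ qb.keys ∧ "b" ∈ qb.keys) := by
      intro h; exact hC ⟨_, List.mem_cons_self .., by rw [hpt1]; exact h⟩
    have hD1 : (size - a) - qr = (b - 1) - qc → ("tl" ∈ qb.keys ∧ "br" ∈ qb.keys) := by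
      intro h; exact hD ⟨_, List.mem_cons_self .., by rw [hpt0, hpt1]; exact h⟩
    have hN1 : (size - a) - qr = -((b - 1) - qc) → ("tr" ∈ qb.keys ∧ "bl" ∈ qb.keys) := by
      intro h; exact hN ⟨_, List.mem_cons_self .., by rw [hpt0, hpt1]; omega⟩
    have hkeys : (pvStepA size qr qc qb (a :: b :: rest0)).keys = qb.keys :=
      pvStepA_keysC size qr qc qb a b rest0 hR1 hC1 hD1 hN1
    simp only [List.foldl_cons, List.map_cons]
    rw [ih (pvStepA size qr qc qb (a :: b :: rest0))
          (by rw [hkeys]; exact hnd)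
          (by intro h; rw [hkeys]; obtain ⟨o, ho, hh⟩ := h; exact hR ⟨o, List.mem_cons_of_mem _ ho, hh⟩)
          (by intro h; rw [hkeys]; obtain ⟨o, ho, hh⟩ := h; exact hC ⟨o, List.mem_cons_of_mem _ ho, hh⟩)
          (by intro h; rw [hkeys]; obtain ⟨o, ho, hh⟩ := h; exact hD ⟨o, List.mem_cons_of_mem _ ho, hh⟩)
          (by intro h; rw [hkeys]; obtain ⟨o, ho, hh⟩ := h; exact hN ⟨o, List.mem_cons_of_mem _ ho, hh⟩)
          (fun o ho => hlen o (List.mem_cons_of_mem _ ho))]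
    rw [pvStepA_items size qr qc qb a b rest0 hR1 hC1 hD1 hN1 hnd]
    simp only [List.map_map]
    refine List.map_congr_left ?_
    rintro ⟨pk, pv⟩ _
    simp only [Function.comp, hpt0, hpt1, convert_py, pvFinal_cons]

lemma pvDoDirL_items (qr qc : Int) (pts : List (Int × Int)) (qb : PVDict) (hnd : qb.keys.Nodup) :
    (pvDoDir qr qc pts qb ("l", 1, true, fun r c => if r = qr then some c else none, fun ns => (qr, ns))).items =
      qb.items.map (fun p => (p.1, if p.1 = "l" then pts.foldl (pvStepL qr qc) p.2 else p.2)) := by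
  by_cases hc : "l" ∈ qb.keys
  · rw [pvDoDirL qr qc pts qb hc hnd,
        PySem.Dict.items_insert_of_contains _ _ ((PySem.Dict.contains_iff_mem_keys _ _).2 hc)]
    refine List.map_congr_left ?_
    rintro ⟨pk, pv⟩ hmem
    have hv := PySem.Dict.getD_of_mem_items qb hmem hnd (0, 0)
    by_cases e1 : pk = "l"
    · subst e1
      simp [hv]
    · simp [e1]
  · have hskip : pvDoDir qr qc pts qb ("l", 1, true, fun r c => if r = qr then some c else none, fun ns => (qr, ns)) = qb := by
      unfold pvDoDir
      rw [if_neg (fun hcc => hc ((PySem.Dict.contains_iff_mem_keys _ _).1 hcc))]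
    rw [hskip]
    conv_lhs => rw [← List.map_id qb.items]
    refine List.map_congr_left ?_
    rintro ⟨pk, pv⟩ hmem
    have hpk : pk ≠ "l" := by
      intro h
      exact hc (h ▸ PySem.Dict.mem_keys_of_mem_items (d := qb) hmem)
    simp [hpk]

lemma pvDoDirL_keys (qr qc : Int) (pts : List (Int × Int)) (qb : PVDict) (hnd : qb.keys.Nodup) :
    (pvDoDir qr qc pts qb ("l", 1, true, fun r c => if r = qr then some c else none, fun ns => (qr, ns))).keys = qb.keys := by
  have h := pvDoDirL_items qr qc pts qb hnd
  simp only [PySem.Dict.keys, h, List.map_map]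
  refine List.map_congr_left ?_
  rintro ⟨pk, pv⟩ _
  rfl

lemma pvDoDirR_items (qr qc : Int) (pts : List (Int × Int)) (qb : PVDict) (hnd : qb.keys.Nodup) :
    (pvDoDir qr qc pts qb ("r", -1, true, fun r c => if r = qr then some c else none, fun ns => (qr, ns))).items =
      qb.items.map (fun p => (p.1, if p.1 = "r" then pts.foldl (pvStepR qr qc) p.2 else p.2)) := by
  by_cases hc : "r" ∈ qb.keys
  · rw [pvDoDirR qr qc pts qb hc hnd,
        PySem.Dict.items_insert_of_contains _ _ ((PySem.Dict.contains_iff_mem_keys _ _).2 hc)]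
    refine List.map_congr_left ?_
    rintro ⟨pk, pv⟩ hmem
    have hv := PySem.Dict.getD_of_mem_items qb hmem hnd (0, 0)
    by_cases e1 : pk = "r"
    · subst e1
      simp [hv]
    · simp [e1]
  · have hskip : pvDoDir qr qc pts qb ("r", -1, true, fun r c => if r = qr then some c else none, fun ns => (qr, ns)) = qb := by
      unfold pvDoDir
      rw [if_neg (fun hcc => hc ((PySem.Dict.contains_iff_mem_keys _ _).1 hcc))]
    rw [hskip]
    conv_lhs => rw [← List.map_id qb.items]
    refine List.map_congr_left ?_
    rintro ⟨pk, pv⟩ hmem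
    have hpk : pk ≠ "r" := by
      intro h
      exact hc (h ▸ PySem.Dict.mem_keys_of_mem_items (d := qb) hmem)
    simp [hpk]

lemma pvDoDirR_keys (qr qc : Int) (pts : List (Int × Int)) (qb : PVDict) (hnd : qb.keys.Nodup) :
    (pvDoDir qr qc pts qb ("r", -1, true, fun r c => if r = qr then some c else none, fun ns => (qr, ns))).keys = qb.keys := by
  have h := pvDoDirR_items qr qc pts qb hnd
  simp only [PySem.Dict.keys, h, List.map_map]
  refine List.map_congr_left ?_
  rintro ⟨pk, pv⟩ _
  rfl

lemma pvDoDirT_items (qr qc : Int) (pts : List (Int × Int)) (qb : PVDict) (hnd : qb.keys.Nodup) :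
    (pvDoDir qr qc pts qb ("t", 1, false, fun r c => if c = qc then some r else none, fun ns => (ns, qc))).items =
      qb.items.map (fun p => (p.1, if p.1 = "t" then pts.foldl (pvStepT qr qc) p.2 else p.2)) := by
  by_cases hc : "t" ∈ qb.keys
  · rw [pvDoDirT qr qc pts qb hc hnd,
        PySem.Dict.items_insert_of_contains _ _ ((PySem.Dict.contains_iff_mem_keys _ _).2 hc)]
    refine List.map_congr_left ?_
    rintro ⟨pk, pv⟩ hmem
    have hv := PySem.Dict.getD_of_mem_items qb hmem hnd (0, 0)
    by_cases e1 : pk = "t"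
    · subst e1
      simp [hv]
    · simp [e1]
  · have hskip : pvDoDir qr qc pts qb ("t", 1, false, fun r c => if c = qc then some r else none, fun ns => (ns, qc)) = qb := by
      unfold pvDoDir
      rw [if_neg (fun hcc => hc ((PySem.Dict.contains_iff_mem_keys _ _).1 hcc))]
    rw [hskip]
    conv_lhs => rw [← List.map_id qb.items]
    refine List.map_congr_left ?_
    rintro ⟨pk, pv⟩ hmem
    have hpk : pk ≠ "t" := by
      intro h
      exact hc (h ▸ PySem.Dict.mem_keys_of_mem_items (d := qb) hmem)
    simp [hpk]

lemma pvDoDirT_keys (qr qc : Int) (pts : List (Int × Int)) (qb : PVDict) (hnd : qb.keys.Nodup) :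
    (pvDoDir qr qc pts qb ("t", 1, false, fun r c => if c = qc then some r else none, fun ns => (ns, qc))).keys = qb.keys := by
  have h := pvDoDirT_items qr qc pts qb hnd
  simp only [PySem.Dict.keys, h, List.map_map]
  refine List.map_congr_left ?_
  rintro ⟨pk, pv⟩ _
  rfl

lemma pvDoDirB_items (qr qc : Int) (pts : List (Int × Int)) (qb : PVDict) (hnd : qb.keys.Nodup) :
    (pvDoDir qr qc pts qb ("b", -1, false, fun r c => if c = qc then some r else none, fun ns => (ns, qc))).items =
      qb.items.map (fun p => (p.1, if p.1 = "b" then pts.foldl (pvStepB qr qc) p.2 else p.2)) := by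
  by_cases hc : "b" ∈ qb.keys
  · rw [pvDoDirB qr qc pts qb hc hnd,
        PySem.Dict.items_insert_of_contains _ _ ((PySem.Dict.contains_iff_mem_keys _ _).2 hc)]
    refine List.map_congr_left ?_
    rintro ⟨pk, pv⟩ hmem
    have hv := PySem.Dict.getD_of_mem_items qb hmem hnd (0, 0)
    by_cases e1 : pk = "b"
    · subst e1
      simp [hv]
    · simp [e1]
  · have hskip : pvDoDir qr qc pts qb ("b", -1, false, fun r c => if c = qc then some r else none, fun ns => (ns, qc)) = qb := by
      unfold pvDoDir
      rw [if_neg (fun hcc => hc ((PySem.Dict.contains_iff_mem_keys _ _).1 hcc))]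
    rw [hskip]
    conv_lhs => rw [← List.map_id qb.items]
    refine List.map_congr_left ?_
    rintro ⟨pk, pv⟩ hmem
    have hpk : pk ≠ "b" := by
      intro h
      exact hc (h ▸ PySem.Dict.mem_keys_of_mem_items (d := qb) hmem)
    simp [hpk]

lemma pvDoDirB_keys (qr qc : Int) (pts : List (Int × Int)) (qb : PVDict) (hnd : qb.keys.Nodup) :
    (pvDoDir qr qc pts qb ("b", -1, false, fun r c => if c = qc then some r else none, fun ns => (ns, qc))).keys = qb.keys := by
  have h := pvDoDirB_items qr qc pts qb hnd
  simp only [PySem.Dict.keys, h, List.map_map]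
  refine List.map_congr_left ?_
  rintro ⟨pk, pv⟩ _
  rfl

lemma pvDoDirTL_items (qr qc : Int) (pts : List (Int × Int)) (qb : PVDict) (hnd : qb.keys.Nodup) :
    (pvDoDir qr qc pts qb ("tl", 1, false, fun r c => if r - qr = c - qc then some r else none, fun ns => (ns, qc + (ns - qr)))).items =
      qb.items.map (fun p => (p.1, if p.1 = "tl" then pts.foldl (pvStepTL qr qc) p.2 else p.2)) := by
  by_cases hc : "tl" ∈ qb.keys
  · rw [pvDoDirTL qr qc pts qb hc hnd,
        PySem.Dict.items_insert_of_contains _ _ ((PySem.Dict.contains_iff_mem_keys _ _).2 hc)]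
    refine List.map_congr_left ?_
    rintro ⟨pk, pv⟩ hmem
    have hv := PySem.Dict.getD_of_mem_items qb hmem hnd (0, 0)
    by_cases e1 : pk = "tl"
    · subst e1
      simp [hv]
    · simp [e1]
  · have hskip : pvDoDir qr qc pts qb ("tl", 1, false, fun r c => if r - qr = c - qc then some r else none, fun ns => (ns, qc + (ns - qr))) = qb := by
      unfold pvDoDir
      rw [if_neg (fun hcc => hc ((PySem.Dict.contains_iff_mem_keys _ _).1 hcc))]
    rw [hskip]
    conv_lhs => rw [← List.map_id qb.items]
    refine List.map_congr_left ?_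
    rintro ⟨pk, pv⟩ hmem
    have hpk : pk ≠ "tl" := by
      intro h
      exact hc (h ▸ PySem.Dict.mem_keys_of_mem_items (d := qb) hmem)
    simp [hpk]

lemma pvDoDirTL_keys (qr qc : Int) (pts : List (Int × Int)) (qb : PVDict) (hnd : qb.keys.Nodup) :
    (pvDoDir qr qc pts qb ("tl", 1, false, fun r c => if r - qr = c - qc then some r else none, fun ns => (ns, qc + (ns - qr)))).keys = qb.keys := by
  have h := pvDoDirTL_items qr qc pts qb hnd
  simp only [PySem.Dict.keys, h, List.map_map]
  refine List.map_congr_left ?_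
  rintro ⟨pk, pv⟩ _
  rfl

lemma pvDoDirBR_items (qr qc : Int) (pts : List (Int × Int)) (qb : PVDict) (hnd : qb.keys.Nodup) :
    (pvDoDir qr qc pts qb ("br", -1, false, fun r c => if r - qr = c - qc then some r else none, fun ns => (ns, qc + (ns - qr)))).items =
      qb.items.map (fun p => (p.1, if p.1 = "br" then pts.foldl (pvStepBR qr qc) p.2 else p.2)) := by
  by_cases hc : "br" ∈ qb.keys
  · rw [pvDoDirBR qr qc pts qb hc hnd,
        PySem.Dict.items_insert_of_contains _ _ ((PySem.Dict.contains_iff_mem_keys _ _).2 hc)]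
    refine List.map_congr_left ?_
    rintro ⟨pk, pv⟩ hmem
    have hv := PySem.Dict.getD_of_mem_items qb hmem hnd (0, 0)
    by_cases e1 : pk = "br"
    · subst e1
      simp [hv]
    · simp [e1]
  · have hskip : pvDoDir qr qc pts qb ("br", -1, false, fun r c => if r - qr = c - qc then some r else none, fun ns => (ns, qc + (ns - qr))) = qb := by
      unfold pvDoDir
      rw [if_neg (fun hcc => hc ((PySem.Dict.contains_iff_mem_keys _ _).1 hcc))]
    rw [hskip]
    conv_lhs => rw [← List.map_id qb.items]
    refine List.map_congr_left ?_
    rintro ⟨pk, pv⟩ hmem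
    have hpk : pk ≠ "br" := by
      intro h
      exact hc (h ▸ PySem.Dict.mem_keys_of_mem_items (d := qb) hmem)
    simp [hpk]

lemma pvDoDirBR_keys (qr qc : Int) (pts : List (Int × Int)) (qb : PVDict) (hnd : qb.keys.Nodup) :
    (pvDoDir qr qc pts qb ("br", -1, false, fun r c => if r - qr = c - qc then some r else none, fun ns => (ns, qc + (ns - qr)))).keys = qb.keys := by
  have h := pvDoDirBR_items qr qc pts qb hnd
  simp only [PySem.Dict.keys, h, List.map_map]
  refine List.map_congr_left ?_
  rintro ⟨pk, pv⟩ _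
  rfl

lemma pvDoDirTR_items (qr qc : Int) (pts : List (Int × Int)) (qb : PVDict) (hnd : qb.keys.Nodup) :
    (pvDoDir qr qc pts qb ("tr", 1, false, fun r c => if r - qr = qc - c then some r else none, fun ns => (ns, qc - (ns - qr)))).items =
      qb.items.map (fun p => (p.1, if p.1 = "tr" then pts.foldl (pvStepTR qr qc) p.2 else p.2)) := by
  by_cases hc : "tr" ∈ qb.keys
  · rw [pvDoDirTR qr qc pts qb hc hnd,
        PySem.Dict.items_insert_of_contains _ _ ((PySem.Dict.contains_iff_mem_keys _ _).2 hc)]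
    refine List.map_congr_left ?_
    rintro ⟨pk, pv⟩ hmem
    have hv := PySem.Dict.getD_of_mem_items qb hmem hnd (0, 0)
    by_cases e1 : pk = "tr"
    · subst e1
      simp [hv]
    · simp [e1]
  · have hskip : pvDoDir qr qc pts qb ("tr", 1, false, fun r c => if r - qr = qc - c then some r else none, fun ns => (ns, qc - (ns - qr))) = qb := by
      unfold pvDoDir
      rw [if_neg (fun hcc => hc ((PySem.Dict.contains_iff_mem_keys _ _).1 hcc))]
    rw [hskip]
    conv_lhs => rw [← List.map_id qb.items]
    refine List.map_congr_left ?_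
    rintro ⟨pk, pv⟩ hmem
    have hpk : pk ≠ "tr" := by
      intro h
      exact hc (h ▸ PySem.Dict.mem_keys_of_mem_items (d := qb) hmem)
    simp [hpk]

lemma pvDoDirTR_keys (qr qc : Int) (pts : List (Int × Int)) (qb : PVDict) (hnd : qb.keys.Nodup) :
    (pvDoDir qr qc pts qb ("tr", 1, false, fun r c => if r - qr = qc - c then some r else none, fun ns => (ns, qc - (ns - qr)))).keys = qb.keys := by
  have h := pvDoDirTR_items qr qc pts qb hnd
  simp only [PySem.Dict.keys, h, List.map_map]
  refine List.map_congr_left ?_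
  rintro ⟨pk, pv⟩ _
  rfl

lemma pvDoDirBL_items (qr qc : Int) (pts : List (Int × Int)) (qb : PVDict) (hnd : qb.keys.Nodup) :
    (pvDoDir qr qc pts qb ("bl", -1, false, fun r c => if r - qr = qc - c then some r else none, fun ns => (ns, qc - (ns - qr)))).items =
      qb.items.map (fun p => (p.1, if p.1 = "bl" then pts.foldl (pvStepBL qr qc) p.2 else p.2)) := by
  by_cases hc : "bl" ∈ qb.keys
  · rw [pvDoDirBL qr qc pts qb hc hnd,
        PySem.Dict.items_insert_of_contains _ _ ((PySem.Dict.contains_iff_mem_keys _ _).2 hc)]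
    refine List.map_congr_left ?_
    rintro ⟨pk, pv⟩ hmem
    have hv := PySem.Dict.getD_of_mem_items qb hmem hnd (0, 0)
    by_cases e1 : pk = "bl"
    · subst e1
      simp [hv]
    · simp [e1]
  · have hskip : pvDoDir qr qc pts qb ("bl", -1, false, fun r c => if r - qr = qc - c then some r else none, fun ns => (ns, qc - (ns - qr))) = qb := by
      unfold pvDoDir
      rw [if_neg (fun hcc => hc ((PySem.Dict.contains_iff_mem_keys _ _).1 hcc))]
    rw [hskip]
    conv_lhs => rw [← List.map_id qb.items]
    refine List.map_congr_left ?_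
    rintro ⟨pk, pv⟩ hmem
    have hpk : pk ≠ "bl" := by
      intro h
      exact hc (h ▸ PySem.Dict.mem_keys_of_mem_items (d := qb) hmem)
    simp [hpk]

lemma pvB_char (qr qc : Int) (pts : List (Int × Int)) (qb : PVDict) (hnd : qb.keys.Nodup) :
    (([("l", 1, true, fun r c => if r = qr then some c else none, fun ns => (qr, ns)),
      ("r", -1, true, fun r c => if r = qr then some c else none, fun ns => (qr, ns)),
      ("t", 1, false, fun r c => if c = qc then some r else none, fun ns => (ns, qc)),
      ("b", -1, false, fun r c => if c = qc then some r else none, fun ns => (ns, qc)),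
      ("tl", 1, false, fun r c => if r - qr = c - qc then some r else none, fun ns => (ns, qc + (ns - qr))),
      ("br", -1, false, fun r c => if r - qr = c - qc then some r else none, fun ns => (ns, qc + (ns - qr))),
      ("tr", 1, false, fun r c => if r - qr = qc - c then some r else none, fun ns => (ns, qc - (ns - qr))),
      ("bl", -1, false, fun r c => if r - qr = qc - c then some r else none, fun ns => (ns, qc - (ns - qr)))] :
      List (String × Int × Bool × (Int → Int → Option Int) × (Int → Int × Int))).foldl (pvDoDir qr qc pts) qb).items =
    qb.items.map (fun p => (p.1, pvFinal qr qc pts p.1 p.2)) := by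
  simp only [List.foldl_cons, List.foldl_nil]
  set D1 := pvDoDir qr qc pts qb ("l", 1, true, fun r c => if r = qr then some c else none, fun ns => (qr, ns)) with hD1
  set D2 := pvDoDir qr qc pts D1 ("r", -1, true, fun r c => if r = qr then some c else none, fun ns => (qr, ns)) with hD2
  set D3 := pvDoDir qr qc pts D2 ("t", 1, false, fun r c => if c = qc then some r else none, fun ns => (ns, qc)) with hD3
  set D4 := pvDoDir qr qc pts D3 ("b", -1, false, fun r c => if c = qc then some r else none, fun ns => (ns, qc)) with hD4
  set D5 := pvDoDir qr qc pts D4 ("tl", 1, false, fun r c => if r - qr = c - qc then some r else none, fun ns => (ns, qc + (ns - qr))) with hD5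
  set D6 := pvDoDir qr qc pts D5 ("br", -1, false, fun r c => if r - qr = c - qc then some r else none, fun ns => (ns, qc + (ns - qr))) with hD6
  set D7 := pvDoDir qr qc pts D6 ("tr", 1, false, fun r c => if r - qr = qc - c then some r else none, fun ns => (ns, qc - (ns - qr))) with hD7
  have k1 : D1.keys = qb.keys := pvDoDirL_keys qr qc pts qb hnd
  have n1 : D1.keys.Nodup := by rw [k1]; exact hnd
  have k2 : D2.keys = qb.keys := by rw [hD2, pvDoDirR_keys qr qc pts D1 n1]; exact k1
  have n2 : D2.keys.Nodup := by rw [k2]; exact hnd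
  have k3 : D3.keys = qb.keys := by rw [hD3, pvDoDirT_keys qr qc pts D2 n2]; exact k2
  have n3 : D3.keys.Nodup := by rw [k3]; exact hnd
  have k4 : D4.keys = qb.keys := by rw [hD4, pvDoDirB_keys qr qc pts D3 n3]; exact k3
  have n4 : D4.keys.Nodup := by rw [k4]; exact hnd
  have k5 : D5.keys = qb.keys := by rw [hD5, pvDoDirTL_keys qr qc pts D4 n4]; exact k4
  have n5 : D5.keys.Nodup := by rw [k5]; exact hnd
  have k6 : D6.keys = qb.keys := by rw [hD6, pvDoDirBR_keys qr qc pts D5 n5]; exact k5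
  have n6 : D6.keys.Nodup := by rw [k6]; exact hnd
  have k7 : D7.keys = qb.keys := by rw [hD7, pvDoDirTR_keys qr qc pts D6 n6]; exact k6
  have n7 : D7.keys.Nodup := by rw [k7]; exact hnd
  rw [pvDoDirBL_items qr qc pts D7 n7, hD7, pvDoDirTR_items qr qc pts D6 n6, hD6,
      pvDoDirBR_items qr qc pts D5 n5, hD5, pvDoDirTL_items qr qc pts D4 n4, hD4,
      pvDoDirB_items qr qc pts D3 n3, hD3, pvDoDirT_items qr qc pts D2 n2, hD2,
      pvDoDirR_items qr qc pts D1 n1, hD1, pvDoDirL_items qr qc pts qb hnd]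
  simp only [List.map_map]
  refine List.map_congr_left ?_
  rintro ⟨pk, pv⟩ _
  by_cases e1 : pk = "l"
  · subst e1; simp [pvFinal, Function.comp]
  · by_cases e2 : pk = "r"
    · subst e2; simp [pvFinal, Function.comp]
    · by_cases e3 : pk = "t"
      · subst e3; simp [pvFinal, Function.comp]
      · by_cases e4 : pk = "b"
        · subst e4; simp [pvFinal, Function.comp]
        · by_cases e5 : pk = "tl"
          · subst e5; simp [pvFinal, Function.comp]
          · by_cases e6 : pk = "br"
            · subst e6; simp [pvFinal, Function.comp]
            · by_cases e7 : pk = "tr"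
              · subst e7; simp [pvFinal, Function.comp]
              · by_cases e8 : pk = "bl"
                · subst e8; simp [pvFinal, Function.comp]
                · simp [pvFinal, Function.comp, e1, e2, e3, e4, e5, e6, e7, e8]

-- ===== VERDICT (by name: the statement is the Claim_ definition above) =====
theorem update_queen_bounds_py_spec : Claim_equal_update_queen_bounds_py := by
  intro size queen_bounds obstacles _hdom hpre
  obtain ⟨hnd0, _hq, hlen, hR, hC, hD, hN⟩ := hpre
  unfold Spec_update_queen_bounds_py
  simp only [update_queen_bounds_py, update_queen_bounds_py_alt]
  have hnd' : (PySem.Dict.mk queen_bounds).keys.Nodup := by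
    rw [PySem.Dict.keys_mk]; exact hnd0
  rw [pvA_char size _ _ obstacles (PySem.Dict.mk queen_bounds) hnd'
        (by intro h; have := hR h; rw [PySem.Dict.keys_mk]; exact this)
        (by intro h; have := hC h; rw [PySem.Dict.keys_mk]; exact this)
        (by intro h; have := hD h; rw [PySem.Dict.keys_mk]; exact this)
        (by intro h; have := hN h; rw [PySem.Dict.keys_mk]; exact this)
        hlen]
  rw [pvB_char _ _ _ _ hnd']
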